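-- pv_equiv track=rewrite | github.com/kjprice/hrbamboo | product_match.py | match_product
-- ===== SOURCE A (Python) =====
-- from typing import Iterable, List
--
-- class ProductException(Exception):
--     pass
--
-- def _is_even(num: int) -> bool:
--     return num % 2 == 0
--
-- def _is_odd(num: int) -> bool:
--     return not _is_even(num)
--
-- def _get_odd_numbers(nums: List[int]) -> List[int]:
--     return list(filter(_is_odd, nums))
--
-- def _even_count(nums: List[int]) -> int:
--     return len(list(filter(_is_even, nums)))
--
-- def _are_all_even(nums: List[int]) -> bool:
--     return _even_count(nums) == len(nums)
--
-- def _abs_diff(num1: int, num2: int) -> int: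
--     return abs(num2 - num1)
--
-- def _is_divisible(num1: int, num2: int):
--     return num1 % num2 == 0 or num2 % num1 == 0
--
-- def _are_any_indivisible(num: int, nums: Iterable[int]) -> bool:
--     for other in nums:
--         if not _is_divisible(num, other):
--             return True
--     return False
--
-- def _are_any_odd_indivisible(nums: List[int]) -> bool:
--     """
--     For the algorithm to work, we must have at least one odd number that:
--     - is not divisible by one other number AND
--     - other number is not divisible by same odd number
--     """
--     nums_set = set(nums)
--     odd_nums = _get_odd_numbers(nums)
--     for odd_num in odd_nums:
--         other_nums = nums_set - set([odd_num])
--         if _are_any_indivisible(odd_num, other_nums):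
--             return True
--     return False
--
-- def _prevalidation(nums: List[int]) -> None:
--     for num in nums:
--         if num < 1:
--             raise ProductException("All products must be positive")
--
--     if len(nums) != len(set(nums)):
--         raise ProductException("All products must be unique")
--
-- def match_product(product_supplies: List[int]) -> int:
--     # TODO: If two numbers are odd and not divisible by each other, return good
--     # TODO: If two numbers are odd and even, and not divisible by each other, return good
--
--     _prevalidation(product_supplies)
--
--     # If any number is 1, impossible
--     if [num for num in product_supplies if num == 1]:
--         return -1
--     # If only one number exists
--     if len(product_supplies) == 1:
--         return -1
--     # If all numbers are even, impossible
--     if _are_all_even(product_supplies):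
--         return -1
--     # If all numbers have a diff of 1, return (lowest value - 1)
--     if len(product_supplies) == 2 and _abs_diff(*product_supplies) == 1:
--         return min(product_supplies) - 1
--
--     # At least one odd number must exist that is not divisible by another number
--     if not _are_any_odd_indivisible(product_supplies):
--         return -1
--     return sum(product_supplies) + 1
-- ===== SOURCE B (Python) =====
-- from typing import List
--
--
-- class ProductException(Exception):
--     pass
--
--
-- def match_product(product_supplies: List[int]) -> int:
--     for num in product_supplies:
--         if num < 1:
--             raise ProductException("All products must be positive")
--     if len(set(product_supplies)) != len(product_supplies):
--         raise ProductException("All products must be unique")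
--
--     if 1 in product_supplies or len(product_supplies) == 1:
--         return -1
--     odds = sorted(n for n in product_supplies if n % 2 == 1)
--     if not odds:
--         return -1
--     if len(product_supplies) == 2 and abs(product_supplies[0] - product_supplies[1]) == 1:
--         return min(product_supplies) - 1
--     # A pair with an odd member that is not mutually divisible exists
--     # UNLESS the sorted odd numbers form a divisibility chain whose maximum
--     # divides every even number (for distinct numbers >= 2 a smaller one is
--     # never divisible by a larger one, and an even never divides an odd).
--     top = odds[-1]
--     if (all(b % a == 0 for a, b in zip(odds, odds[1:]))
--             and all(n % 2 == 1 or n % top == 0 for n in product_supplies)):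
--         return -1
--     return sum(product_supplies) + 1
-- ===== Notes on version B (the rewrite author's own statement) =====
-- stated objective: faster
-- what changed: The quadratic odd-vs-all indivisibility scan is replaced by a sort of the odd numbers plus two linear checks: a good pair exists unless the sorted odds form a divisibility chain whose maximum divides every even number (for distinct numbers >= 2 a smaller never divides into a larger's remainder being zero the other way, and an even never divides an odd).
import Mathlib
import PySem

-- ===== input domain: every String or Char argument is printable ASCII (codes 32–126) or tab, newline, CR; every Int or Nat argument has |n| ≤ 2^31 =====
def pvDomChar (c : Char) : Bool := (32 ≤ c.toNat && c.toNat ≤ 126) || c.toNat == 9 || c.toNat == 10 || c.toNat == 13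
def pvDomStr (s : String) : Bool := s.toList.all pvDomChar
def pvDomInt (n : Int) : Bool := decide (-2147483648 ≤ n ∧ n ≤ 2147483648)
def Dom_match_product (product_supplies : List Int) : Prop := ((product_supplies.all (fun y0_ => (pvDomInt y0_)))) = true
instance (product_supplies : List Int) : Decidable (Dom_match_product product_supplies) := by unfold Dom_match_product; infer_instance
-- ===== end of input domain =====

-- B replaces A's quadratic odd-vs-all indivisibility scan by sorting the odd numbers and
-- checking a divisibility-chain characterization (chain of odds + max odd divides every even);
-- objective: faster. A raises ProductException on non-positive or duplicate inputs; B raises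
-- there too, and Pre_ excludes exactly those inputs (the ports return the dummy 0 there).

-- ===== PORT A =====
def pvIsEven (num : Int) : Bool := PySem.Int.mod num 2 == 0

def pvIsOdd (num : Int) : Bool := !(pvIsEven num)

def pvGetOddNumbers (nums : List Int) : List Int := nums.filter pvIsOdd

def pvEvenCount (nums : List Int) : Int := ((nums.filter pvIsEven).length : Int)

def pvAreAllEven (nums : List Int) : Bool := pvEvenCount nums == (nums.length : Int)

def pvAbsDiff (num1 num2 : Int) : Int := ((num2 - num1).natAbs : Int)

def pvIsDivisible (num1 num2 : Int) : Bool :=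
  PySem.Int.mod num1 num2 == 0 || PySem.Int.mod num2 num1 == 0

def pvAreAnyIndivisible (num : Int) (nums : List Int) : Bool :=
  nums.any (fun other => !(pvIsDivisible num other))

def pvAreAnyOddIndivisible (nums : List Int) : Bool :=
  let numsSet := PySem.Set.ofList nums
  (pvGetOddNumbers nums).any (fun oddNum =>
    pvAreAnyIndivisible oddNum (PySem.Set.diff numsSet (PySem.Set.ofList [oddNum])))

def match_product (product_supplies : List Int) : Int :=
  -- _prevalidation: both raises are modelled as the dummy 0, excluded by Pre_
  if product_supplies.any (fun num => decide (num < 1)) then 0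
  else if product_supplies.length ≠ (PySem.Set.ofList product_supplies).length then 0
  else if !(product_supplies.filter (fun num => num == 1)).isEmpty then -1
  else if product_supplies.length == 1 then -1
  else if pvAreAllEven product_supplies then -1
  else if product_supplies.length == 2 &&
      pvAbsDiff ((PySem.List.pyGet? product_supplies 0).getD 0)
                ((PySem.List.pyGet? product_supplies 1).getD 0) == 1 then
    (PySem.List.min? product_supplies (fun x => x)).getD 0 - 1
  else if !(pvAreAnyOddIndivisible product_supplies) then -1
  else product_supplies.sum + 1

-- ===== PORT B =====
def pbOdds (nums : List Int) : List Int :=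
  PySem.List.sorted (nums.filter (fun n => PySem.Int.mod n 2 == 1)) (fun x => x) false

def match_product_alt (product_supplies : List Int) : Int :=
  if product_supplies.any (fun num => decide (num < 1)) then 0
  else if (PySem.Set.ofList product_supplies).length ≠ product_supplies.length then 0
  else if product_supplies.contains 1 || product_supplies.length == 1 then -1
  else
    let odds := pbOdds product_supplies
    if odds.isEmpty then -1
    else if product_supplies.length == 2 &&
        (((PySem.List.pyGet? product_supplies 0).getD 0 -
          (PySem.List.pyGet? product_supplies 1).getD 0).natAbs == 1) then
      (PySem.List.min? product_supplies (fun x => x)).getD 0 - 1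
    else
      let top := (PySem.List.pyGet? odds (-1)).getD 0
      if (odds.zip (odds.drop 1)).all (fun p => PySem.Int.mod p.2 p.1 == 0) &&
          product_supplies.all (fun n => PySem.Int.mod n 2 == 1 || PySem.Int.mod n top == 0) then -1
      else product_supplies.sum + 1

-- ===== PRECONDITION & SPEC =====
-- Pre_ excludes exactly the inputs on which A raises ProductException:
-- some element < 1, or duplicate elements.
def Pre_match_product (product_supplies : List Int) : Prop :=
  (∀ n ∈ product_supplies, 1 ≤ n) ∧ product_supplies.Nodup
instance (product_supplies : List Int) : Decidable (Pre_match_product product_supplies) := by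
  unfold Pre_match_product; infer_instance

def pvWitness_match_product : List Int := [3, 4, 7]

def Spec_match_product (product_supplies : List Int) (out : Int) : Prop := out = match_product_alt product_supplies
instance (product_supplies : List Int) (out : Int) : Decidable (Spec_match_product product_supplies out) := by unfold Spec_match_product; infer_instance

-- ===== CLAIM (what is proved, stated in full; the proofs are below) =====
def Claim_equal_match_product : Prop := ∀ (product_supplies : List Int), Dom_match_product product_supplies → Pre_match_product product_supplies → Spec_match_product product_supplies (match_product product_supplies)

-- ===== LEMMAS AND PROOFS =====

-- characterisation of A's helper
theorem pvA_iff (nums : List Int) :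
    pvAreAnyOddIndivisible nums = true ↔
      ∃ o ∈ nums, pvIsOdd o = true ∧ ∃ x ∈ nums, x ≠ o ∧ ¬ pvIsDivisible o x = true := by
  simp only [pvAreAnyOddIndivisible, pvGetOddNumbers, pvAreAnyIndivisible,
    List.any_eq_true, List.mem_filter]
  constructor
  · rintro ⟨o, ⟨ho, hodd⟩, x, hx, hnd2⟩
    rw [PySem.Set.mem_diff] at hx
    refine ⟨o, ho, hodd, x, ?_, ?_, by simpa using hnd2⟩
    · exact (PySem.Set.mem_ofList _ _).1 hx.1
    · intro h; exact hx.2 (by simp [PySem.Set.ofList, PySem.Set.add, h])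
  · rintro ⟨o, ho, hodd, x, hx, hne, hnd2⟩
    refine ⟨o, ⟨ho, hodd⟩, x, ?_, by simpa using hnd2⟩
    rw [PySem.Set.mem_diff]
    refine ⟨(PySem.Set.mem_ofList _ _).2 hx, ?_⟩
    intro h
    simp [PySem.Set.ofList, PySem.Set.add] at h
    exact hne h

-- booleans to divisibility, for Int arguments
theorem pvDiv_iff (a b : Int) : pvIsDivisible a b = true ↔ (b ∣ a ∨ a ∣ b) := by
  simp only [pvIsDivisible, Bool.or_eq_true, beq_iff_eq, PySem.Int.mod_eq_zero_iff_dvd]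

theorem pvOdd_iff (n : Int) : pvIsOdd n = true ↔ ¬ (2:Int) ∣ n := by
  simp only [pvIsOdd, pvIsEven, Bool.not_eq_true', beq_eq_false_iff_ne, ne_eq,
    PySem.Int.mod_eq_zero_iff_dvd]

theorem mod2_one_iff (n : Int) : (PySem.Int.mod n 2 == 1) = true ↔ ¬ (2:Int) ∣ n := by
  have h0 := PySem.Int.mod_nonneg n (b := 2) (by norm_num)
  have h1 := PySem.Int.mod_lt n (b := 2) (by norm_num)
  rw [← PySem.Int.mod_eq_zero_iff_dvd]
  constructor
  · intro h; simp only [beq_iff_eq] at h; omega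
  · intro h; simp only [beq_iff_eq]; omega

-- an even number never divides an odd one
theorem even_not_dvd_odd {e o : Int} (he : (2:Int) ∣ e) (ho : ¬ (2:Int) ∣ o) : ¬ e ∣ o :=
  fun h => ho (dvd_trans he h)

-- among distinct positives, the larger never divides the smaller
theorem not_dvd_of_lt {a b : Int} (ha : 0 < a) (hab : a < b) : ¬ b ∣ a :=
  fun h => absurd (Int.le_of_dvd ha h) (by omega)

-- B's chain test is IsChain (· ∣ ·)
theorem zipAll_isChain (l : List Int) :
    ((l.zip (l.drop 1)).all (fun p => PySem.Int.mod p.2 p.1 == 0) = true) ↔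
      l.IsChain (· ∣ ·) := by
  induction l with
  | nil => simp
  | cons a t ih =>
    cases t with
    | nil => simp
    | cons b t' =>
      rw [show List.drop 1 (b :: t') = t' from rfl] at ih
      simp only [List.drop_succ_cons, List.drop_zero, List.zip_cons_cons, List.all_cons,
        Bool.and_eq_true, List.isChain_cons_cons]
      rw [ih]
      simp only [beq_iff_eq, PySem.Int.mod_eq_zero_iff_dvd]

-- facts about pbOdds
theorem mem_pbOdds (nums : List Int) (x : Int) :
    x ∈ pbOdds nums ↔ x ∈ nums ∧ ¬ (2:Int) ∣ x := by
  rw [pbOdds, PySem.List.mem_sorted, List.mem_filter, mod2_one_iff]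

theorem pbOdds_sorted (nums : List Int) : (pbOdds nums).Pairwise (· ≤ ·) := by
  have := PySem.List.sorted_pairwise (xs := nums.filter (fun n => PySem.Int.mod n 2 == 1))
    (key := fun x : Int => x)
  exact this

-- adjacent pairs of a Pairwise list satisfy the relation
theorem pairwise_zip_adj {R : Int → Int → Prop} (l : List Int) (h : l.Pairwise R) :
    ∀ p ∈ l.zip (l.drop 1), R p.1 p.2 := by
  induction l with
  | nil => simp
  | cons a t ih =>
    cases t with
    | nil => simp
    | cons b t' =>
      intro p hp
      rw [show List.drop 1 (a :: b :: t') = b :: t' from rfl, List.zip_cons_cons] at hp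
      rcases List.mem_cons.1 hp with h' | h'
      · subst h'
        exact (List.pairwise_cons.1 h).1 b List.mem_cons_self
      · exact ih ((List.pairwise_cons.1 h).2) p h'

-- the key equivalence: A's scan vs B's chain test, on nodup lists of numbers ≥ 2
theorem scans_agree (nums : List Int) (h2 : ∀ n ∈ nums, 2 ≤ n)
    (hne : pbOdds nums ≠ []) :
    pvAreAnyOddIndivisible nums =
      !(((pbOdds nums).zip ((pbOdds nums).drop 1)).all (fun p => PySem.Int.mod p.2 p.1 == 0) &&
        nums.all (fun n => PySem.Int.mod n 2 == 1 ||
          PySem.Int.mod n ((PySem.List.pyGet? (pbOdds nums) (-1)).getD 0) == 0)) := by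
  set odds := pbOdds nums with hodds
  have htopdef : (PySem.List.pyGet? odds (-1)).getD 0 = odds.getLast hne := by
    rw [PySem.List.pyGet?_neg_one, List.getLast?_eq_getLast_of_ne_nil hne]; rfl
  set top := (PySem.List.pyGet? odds (-1)).getD 0 with htop
  have htopmem : top ∈ odds := htopdef ▸ List.getLast_mem hne
  have htopnums : top ∈ nums := ((mem_pbOdds nums top).1 htopmem).1
  have htopodd : ¬ (2:Int) ∣ top := ((mem_pbOdds nums top).1 htopmem).2
  have hmax : ∀ x ∈ odds, x ≤ top := by
    intro x hx
    rw [htopdef]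
    exact ((pbOdds_sorted nums).rel_getLast_of_rel_getLast_getLast hx (le_refl _))
  rw [Bool.eq_iff_iff, pvA_iff, Bool.not_eq_true', Bool.and_eq_false_iff]
  constructor
  · -- a bad pair exists ⇒ chain or even-check fails
    rintro ⟨o, ho, hodd, x, hx, hxo, hdiv⟩
    rw [pvOdd_iff] at hodd
    rw [pvDiv_iff] at hdiv
    rw [not_or] at hdiv
    by_cases hch : ((odds.zip (List.drop 1 odds)).all fun p => PySem.Int.mod p.2 p.1 == 0) = true
    case neg => exact Or.inl (Bool.eq_false_iff.2 hch)
    by_cases hall : (nums.all fun n => PySem.Int.mod n 2 == 1 || PySem.Int.mod n top == 0) = true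
    case neg => exact Or.inr (Bool.eq_false_iff.2 hall)
    exfalso
    rw [zipAll_isChain] at hch
    have hpair : odds.Pairwise (· ∣ ·) := (List.isChain_iff_pairwise).1 hch
    have hor : ∀ a ∈ odds, ∀ b ∈ odds, a ≠ b → a ∣ b ∨ b ∣ a := by
      intro a ha b hb hab
      have hpair2 : odds.Pairwise (fun a b => a ∣ b ∨ b ∣ a) :=
        hpair.imp (fun h => Or.inl h)
      exact hpair2.forall (fun a b h => h.symm) ha hb hab
    have heven : ∀ n ∈ nums, (2:Int) ∣ n → top ∣ n := by
      intro n hn h2n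
      rw [List.all_eq_true] at hall
      have h := hall n hn
      rw [Bool.or_eq_true] at h
      rcases h with h | h
      · exact absurd h2n ((mod2_one_iff n).1 h)
      · rw [beq_iff_eq, PySem.Int.mod_eq_zero_iff_dvd] at h; exact h
    have hoodds : o ∈ odds := (mem_pbOdds nums o).2 ⟨ho, hodd⟩
    have hotop : o ∣ top := by
      rcases eq_or_ne o top with h | h
      · exact h ▸ dvd_refl _
      · rcases hor o hoodds top htopmem h with h' | h'
        · exact h'
        · have hto : top ≤ o := Int.le_of_dvd (by have := h2 o ho; omega) h'
          have : o = top := le_antisymm (hmax o hoodds) hto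
          exact this ▸ dvd_refl _
    by_cases hx2 : (2:Int) ∣ x
    · exact hdiv.2 (dvd_trans hotop (heven x hx hx2))
    · have hxodds : x ∈ odds := (mem_pbOdds nums x).2 ⟨hx, hx2⟩
      rcases hor o hoodds x hxodds (fun h => hxo h.symm) with h | h
      · exact hdiv.2 h
      · exact hdiv.1 h
  · -- chain or even-check fails ⇒ a bad pair exists
    intro hfail
    rcases hfail with hch | hall
    · -- chain broken: adjacent odds a, b with ¬ a ∣ b give a bad pair
      rw [List.all_eq_false] at hch
      obtain ⟨p, hp, hpv⟩ := hch
      obtain ⟨a, b⟩ := p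
      have hab : ¬ a ∣ b := by
        intro h
        exact hpv (by rw [beq_iff_eq, PySem.Int.mod_eq_zero_iff_dvd]; exact h)
      have hmem := List.of_mem_zip hp
      have haodds : a ∈ odds := hmem.1
      have hbodds : b ∈ odds := List.mem_of_mem_drop hmem.2
      have hle : a ≤ b := pairwise_zip_adj odds (pbOdds_sorted nums) (a, b) hp
      have hne' : a ≠ b := fun h => hab (h ▸ dvd_refl a)
      have hanums : a ∈ nums := ((mem_pbOdds nums a).1 haodds).1
      have hbnums : b ∈ nums := ((mem_pbOdds nums b).1 hbodds).1
      have hba : ¬ b ∣ a := not_dvd_of_lt (by have := h2 a hanums; omega)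
        (lt_of_le_of_ne hle hne')
      refine ⟨a, hanums, (pvOdd_iff a).2 ((mem_pbOdds nums a).1 haodds).2,
        b, hbnums, fun h => hne' h.symm, ?_⟩
      rw [pvDiv_iff]
      rintro (h | h)
      · exact hba h
      · exact hab h
    · -- even-check broken: n even with top ∤ n gives a bad pair with top
      rw [List.all_eq_false] at hall
      obtain ⟨n, hn, hnv⟩ := hall
      rw [Bool.or_eq_true, not_or] at hnv
      rcases hnv with ⟨hn1, hn2⟩
      have h2n : (2:Int) ∣ n := by
        by_contra h
        exact hn1 ((mod2_one_iff n).2 h)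
      have htn : ¬ top ∣ n := by
        intro h
        exact hn2 (by rw [beq_iff_eq, PySem.Int.mod_eq_zero_iff_dvd]; exact h)
      refine ⟨top, htopnums, (pvOdd_iff top).2 htopodd, n, hn, ?_, ?_⟩
      · intro h; exact htopodd (h ▸ h2n)
      · rw [pvDiv_iff]
        rintro (h | h)
        · exact even_not_dvd_odd h2n htopodd h
        · exact htn h

-- guard equivalences
theorem guard1_eq (nums : List Int) :
    (!(nums.filter (fun num => num == 1)).isEmpty) = nums.contains 1 := by
  cases hm : nums.contains 1
  · have hnm : (1 : Int) ∉ nums := by simpa using hm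
    have hf : nums.filter (fun num => num == 1) = [] := by
      rw [List.filter_eq_nil_iff]
      intro a ha hb
      simp only [beq_iff_eq] at hb
      exact hnm (hb ▸ ha)
    simp [hf]
  · have hm' : (1 : Int) ∈ nums := by simpa using hm
    have hf : nums.filter (fun num => num == 1) ≠ [] := by
      intro hf
      rw [List.filter_eq_nil_iff] at hf
      exact (hf 1 hm' (by simp))
    simp [hf]

theorem pbOdds_eq_nil_iff (nums : List Int) :
    pbOdds nums = [] ↔ nums.filter (fun n => PySem.Int.mod n 2 == 1) = [] := by
  have hperm := PySem.List.sorted_perm (nums.filter (fun n => PySem.Int.mod n 2 == 1))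
    (fun x : Int => x) false
  have hperm' : (pbOdds nums).Perm (nums.filter (fun n => PySem.Int.mod n 2 == 1)) := hperm
  constructor
  · intro h; rw [h] at hperm'; exact hperm'.symm.eq_nil
  · intro h; rw [h] at hperm'; exact hperm'.eq_nil

theorem guard3_eq (nums : List Int) :
    pvAreAllEven nums = (pbOdds nums).isEmpty := by
  rw [Bool.eq_iff_iff]
  simp only [pvAreAllEven, pvEvenCount, beq_iff_eq, Nat.cast_inj,
    List.length_filter_eq_length_iff, List.isEmpty_iff, pbOdds_eq_nil_iff,
    List.filter_eq_nil_iff]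
  constructor
  · intro h a ha hodd
    have h1 := h a ha
    rw [pvIsEven, beq_iff_eq] at h1
    omega
  · intro h a ha
    rw [pvIsEven, beq_iff_eq]
    have h2' := h a ha
    have h0 := PySem.Int.mod_nonneg a (b := 2) (by norm_num)
    have h1 := PySem.Int.mod_lt a (b := 2) (by norm_num)
    omega

-- ===== VERDICT (by name: the statement is the Claim_ definition above) =====
theorem match_product_spec : Claim_equal_match_product := by
  intro nums _ hpre
  rcases hpre with ⟨hpos, hnd⟩
  unfold Spec_match_product match_product match_product_alt
  have h1 : nums.any (fun num => decide (num < 1)) = false := by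
    simp only [List.any_eq_false, decide_eq_true_eq]
    intro a ha
    exact not_lt.2 (hpos a ha)
  rw [h1]
  simp only [Bool.false_eq_true, if_false]
  have h2 : (PySem.Set.ofList nums) = nums := PySem.Set.ofList_eq_self_of_nodup nums hnd
  rw [h2]
  simp only [ne_eq, not_true_eq_false, if_false]
  rw [guard1_eq, guard3_eq]
  cases hc1 : nums.contains 1 <;> cases hc2 : (nums.length == 1) <;>
    cases hc3 : (pbOdds nums).isEmpty <;>
    simp only [Bool.or_true, Bool.or_false, if_true, if_false, Bool.false_eq_true]
  -- remaining: the diff-1 branch condition and the final scans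
  all_goals {
    have h4 : (pvAbsDiff ((PySem.List.pyGet? nums 0).getD 0) ((PySem.List.pyGet? nums 1).getD 0)
        == 1) =
        (((PySem.List.pyGet? nums 0).getD 0 - (PySem.List.pyGet? nums 1).getD 0).natAbs == 1) := by
      have hc : ((PySem.List.pyGet? nums 1).getD 0 - (PySem.List.pyGet? nums 0).getD 0).natAbs
          = ((PySem.List.pyGet? nums 0).getD 0 - (PySem.List.pyGet? nums 1).getD 0).natAbs := by
        omega
      unfold pvAbsDiff
      rw [hc, Bool.eq_iff_iff]
      simp only [beq_iff_eq]
      omega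
    rw [h4]
    have hones : (1:Int) ∉ nums := by simpa using hc1
    have hge2 : ∀ n ∈ nums, 2 ≤ n := by
      intro n hn
      have := hpos n hn
      rcases eq_or_lt_of_le this with h | h
      · exact absurd (h ▸ hn) (by simpa using hones)
      · omega
    have hoddsne : pbOdds nums ≠ [] := by
      intro h; rw [h] at hc3; simp at hc3
    rw [scans_agree nums hge2 hoddsne]
    cases hb : (((pbOdds nums).zip ((pbOdds nums).drop 1)).all (fun p => PySem.Int.mod p.2 p.1 == 0) &&
        nums.all (fun n => PySem.Int.mod n 2 == 1 ||
          PySem.Int.mod n ((PySem.List.pyGet? (pbOdds nums) (-1)).getD 0) == 0)) <;> simp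
  }
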